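-- pv_equiv track=rewrite | github.com/theoldmoon0602/english_exam_preparation | eng.py | parse_paren
-- ===== SOURCE A (Python) =====
-- def parse_paren(text):
--     words = []
--     wbuf = str()
--     for i, c in enumerate(text):
--         if c == '|':
--             words.append(wbuf)
--             wbuf = str()
--         elif c == ')':
--             words.append(wbuf)
--             return (i, words)
--         else:
--             wbuf += c
-- ===== SOURCE B (Python) =====
-- def parse_paren(text):
--     i = text.find(')')
--     if i == -1:
--         return None
--     return (i, text[:i].split('|'))
-- ===== Notes on version B (the rewrite author's own statement) =====
-- stated objective: idiomatic
-- what changed: Replaces the character-by-character enumerate loop with mutable word buffers by a locate-then-split pass: find the index of ')' and split the prefix on '|'.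
-- outside the precondition, e.g. on parse_paren('ab|c'): A returns None, B returns None; on parse_paren('|'): A returns None, B returns None
import Mathlib
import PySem

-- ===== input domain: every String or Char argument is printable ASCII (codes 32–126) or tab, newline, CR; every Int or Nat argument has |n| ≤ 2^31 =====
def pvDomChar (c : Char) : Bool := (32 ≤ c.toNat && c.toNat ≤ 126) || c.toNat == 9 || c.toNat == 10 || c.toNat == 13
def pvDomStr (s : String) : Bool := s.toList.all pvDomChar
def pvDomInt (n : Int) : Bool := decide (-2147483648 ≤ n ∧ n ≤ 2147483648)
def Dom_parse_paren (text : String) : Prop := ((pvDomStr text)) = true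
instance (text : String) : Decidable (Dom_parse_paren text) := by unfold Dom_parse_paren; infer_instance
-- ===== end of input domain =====

-- B replaces A's character-by-character accumulation loop by find-the-')' then split-the-prefix-on-'|' (idiomatic, same cost).

-- ===== PORT A =====
-- the for-loop of A: chars left, current index i, words so far, current word buffer;
-- none = the loop falls off the end (Python A returns None there)
def parseParenLoop : List Char → Int → List (List Char) → List Char → Option (Int × List (List Char))
  | [], _, _, _ => none
  | c :: cs, i, words, wbuf =>
    if c = '|' then parseParenLoop cs (i + 1) (words ++ [wbuf]) []
    else if c = ')' then some (i, words ++ [wbuf])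
    else parseParenLoop cs (i + 1) words (wbuf ++ [c])

def parse_paren (text : String) : Int × List String :=
  match parseParenLoop text.toList 0 [] [] with
  | some (i, words) => (i, words.map String.ofList)
  | none => (0, [])   -- Python A returns None here; excluded by Pre_parse_paren

-- ===== PORT B =====
def parse_paren_alt (text : String) : Int × List String :=
  let i := PySem.Str.find text ")"
  if i = -1 then (0, [])   -- Python B returns None here; excluded by Pre_parse_paren
  else (i, (PySem.Str.split? (PySem.Str.slice text none (some i)) "|").getD [])

-- ===== PRECONDITION & SPEC =====
-- Pre_ excludes texts with no ')': there Python A (and B) return None, which is not a value of the declared pair type.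
def Pre_parse_paren (text : String) : Prop := ')' ∈ text.toList
instance (text : String) : Decidable (Pre_parse_paren text) := by unfold Pre_parse_paren; infer_instance
def pvWitness_parse_paren : String := "ab|c)"

def Spec_parse_paren (text : String) (out : Int × List String) : Prop := out = parse_paren_alt text
instance (text : String) (out : Int × List String) : Decidable (Spec_parse_paren text out) := by unfold Spec_parse_paren; infer_instance

-- ===== CLAIM (what is proved, stated in full; the proofs are below) =====
def Claim_equal_parse_paren : Prop := ∀ (text : String), Dom_parse_paren text → Pre_parse_paren text → Spec_parse_paren text (parse_paren text)

-- ===== LEMMAS AND PROOFS =====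

-- reference splitter: split l on '|', pre = pending prefix of the current piece
def pvSpl : List Char → List Char → List (List Char)
  | pre, [] => [pre]
  | pre, c :: cs => if c = '|' then pre :: pvSpl [] cs else pvSpl (pre ++ [c]) cs

theorem splitOn_go_spec : ∀ (fuel : Nat) (l cur : List Char) (acc : List (List Char)),
    l.length < fuel →
    PySem.Chars.splitOn.go ['|'] fuel l cur acc = acc.reverse ++ pvSpl cur.reverse l := by
  intro fuel
  induction fuel with
  | zero => intro l cur acc h; omega
  | succ f ih =>
    intro l cur acc h
    cases l with
    | nil => simp [PySem.Chars.splitOn.go, pvSpl]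
    | cons c cs =>
      by_cases hc : c = '|'
      · subst hc
        have : List.isPrefixOf ['|'] ('|' :: cs) = true := by simp [List.isPrefixOf]
        rw [PySem.Chars.splitOn.go, if_pos this]
        have hdrop : List.drop (['|'].length) ('|' :: cs) = cs := rfl
        rw [hdrop]
        simp only [List.length_cons] at h
        rw [ih _ _ _ (by omega)]
        simp [pvSpl]
      · have : List.isPrefixOf ['|'] (c :: cs) = false := by
          simp [List.isPrefixOf]; exact fun h => absurd h.symm hc
        rw [PySem.Chars.splitOn.go, if_neg (by simp [this])]
        simp only [List.length_cons] at h
        rw [ih _ _ _ (by omega)]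
        simp [pvSpl, hc]

theorem splitOn_eq_pvSpl (l : List Char) : PySem.Chars.splitOn l ['|'] = pvSpl [] l := by
  rw [PySem.Chars.splitOn, splitOn_go_spec _ _ _ _ (by omega)]
  simp

-- A's loop returns the first index of ')' and the words of the prefix, for any buffer state
theorem parseParenLoop_spec : ∀ (cs : List Char) (i : Int) (words : List (List Char)) (wbuf : List Char),
    ')' ∈ cs →
    parseParenLoop cs i words wbuf =
      some (i + (cs.idxOf ')' : Nat), words ++ pvSpl wbuf (cs.take (cs.idxOf ')'))) := by
  intro cs
  induction cs with
  | nil => intro _ _ _ h; simp at h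
  | cons c cs ih =>
    intro i words wbuf h
    by_cases hp : c = ')'
    · subst hp
      simp [parseParenLoop, pvSpl]
    · have hmem : ')' ∈ cs := by
        rcases List.mem_cons.mp h with h1 | h1
        · exact absurd h1.symm hp
        · exact h1
      by_cases hb : c = '|'
      · subst hb
        rw [parseParenLoop, if_pos rfl, ih _ _ _ hmem]
        simp [pvSpl]
        push_cast; ring
      · rw [parseParenLoop, if_neg hb, if_neg hp, ih _ _ _ hmem]
        have : (c :: cs).idxOf ')' = cs.idxOf ')' + 1 := by
          simp [hp]
        rw [this]
        simp [pvSpl, hb]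
        ring

-- Chars.find for the one-character needle [')'] is the first index of ')'
theorem find_go_spec : ∀ (l : List Char) (k : Nat), ')' ∈ l →
    PySem.Chars.find.go [')'] l k = (k : Int) + (l.idxOf ')' : Nat) := by
  intro l
  induction l with
  | nil => intro _ h; simp at h
  | cons c cs ih =>
    intro k h
    by_cases hp : c = ')'
    · subst hp
      have : List.isPrefixOf [')'] (')' :: cs) = true := by simp [List.isPrefixOf]
      rw [PySem.Chars.find.go, if_pos this]
      simp
    · have hmem : ')' ∈ cs := by
        rcases List.mem_cons.mp h with h1 | h1
        · exact absurd h1.symm hp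
        · exact h1
      have : List.isPrefixOf [')'] (c :: cs) = false := by
        simp [List.isPrefixOf]; exact fun h => absurd h.symm hp
      rw [PySem.Chars.find.go, if_neg (by simp [this]), ih _ hmem]
      have : (c :: cs).idxOf ')' = cs.idxOf ')' + 1 := by simp [hp]
      rw [this]
      push_cast; ring

theorem find_close_eq (s : String) (h : ')' ∈ s.toList) :
    PySem.Str.find s ")" = (s.toList.idxOf ')' : Nat) := by
  rw [PySem.Str.find_eq]
  have : (")" : String).toList = [')'] := rfl
  rw [this, PySem.Chars.find, find_go_spec _ _ h]
  simp

-- ===== VERDICT (by name: the statement is the Claim_ definition above) =====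
theorem parse_paren_spec : Claim_equal_parse_paren := by
  intro text _ hpre
  unfold Spec_parse_paren
  have hpre' : ')' ∈ text.toList := hpre
  set cs := text.toList with hcs
  have hidx : cs.idxOf ')' < cs.length := List.idxOf_lt_length_of_mem hpre'
  -- evaluate A
  unfold parse_paren
  rw [parseParenLoop_spec _ _ _ _ hpre']
  -- evaluate B
  unfold parse_paren_alt
  have hfind : PySem.Str.find text ")" = (cs.idxOf ')' : Nat) := find_close_eq text hpre'
  rw [hfind]
  have hne : ((cs.idxOf ')' : Nat) : Int) ≠ -1 := by intro hE; omega
  rw [if_neg hne]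
  -- the split
  have hsplit : PySem.Str.split? (PySem.Str.slice text none (some ((cs.idxOf ')' : Nat) : Int))) "|"
      = some ((pvSpl [] (cs.take (cs.idxOf ')'))).map String.ofList) := by
    have htl : (PySem.Str.slice text none (some ((cs.idxOf ')' : Nat) : Int))).toList
        = cs.take (cs.idxOf ')') := by
      rw [PySem.Str.toList_slice, ← hcs, PySem.Chars.slice_eq_listSlice,
        PySem.List.slice_to_natCast]
    have hbar : ("|" : String).toList = ['|'] := rfl
    have hsp2 : PySem.Chars.split? (cs.take (cs.idxOf ')')) ['|'] = some (pvSpl [] (cs.take (cs.idxOf ')'))) := by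
      simp [PySem.Chars.split?, splitOn_eq_pvSpl]
    have := PySem.Str.split?_map (PySem.Str.slice text none (some ((cs.idxOf ')' : Nat) : Int))) "|"
    rw [htl, hbar, hsp2] at this
    -- this : Option.map (List.map String.toList) (split? …) = some (pvSpl [] (take …))
    cases hsp : PySem.Str.split? (PySem.Str.slice text none (some ((cs.idxOf ')' : Nat) : Int))) "|" with
    | none => rw [hsp] at this; simp at this
    | some parts =>
      rw [hsp] at this
      simp only [Option.map_some, Option.some.injEq] at this
      congr 1
      rw [← this]
      simp [List.map_map, Function.comp_def]
  rw [hsplit]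
  simp
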